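-- pv_equiv track=rewrite | github.com/IvanPyzhyanov/Course_work_2 | functions.py | making_tags
-- ===== SOURCE A (Python) =====
-- def making_tags(content):
--     '''making function which find words started on symbol "#" and change their to link'''
--     words = content.split(" ")
--     for i, word in enumerate(words):
--         if word.startswith("#"):
--             tag = word.replace("#", "")
--             tag = tag.replace("!", "")
--             tag = tag.replace(",", "")
--             tag = tag.replace(".", "")
--             link = f"<a href='tag/{tag}'>{word}</a>"
--             words[i] = link
--     return " ".join(words)
-- ===== SOURCE B (Python) =====
-- def _render(word):
--     if word.startswith("#"):
--         tag = "".join(c for c in word if c not in "#!,.")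
--         return f"<a href='tag/{tag}'>{word}</a>"
--     return word
--
--
-- def making_tags(content):
--     '''making function which find words started on symbol "#" and change their to link'''
--     out = []
--     cur = []
--     for ch in content:
--         if ch == " ":
--             out.append(_render("".join(cur)))
--             out.append(" ")
--             cur = []
--         else:
--             cur.append(ch)
--     out.append(_render("".join(cur)))
--     return "".join(out)
-- ===== Notes on version B (the rewrite author's own statement) =====
-- stated objective: alternative
-- what changed: B replaces A's split/enumerate/index-assignment/join pipeline with a single left-to-right character scan that emits the output incrementally, rendering each space-delimited token as it ends and stripping the four punctuation characters with one filtering pass instead of four sequential str.replace passes.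
import Mathlib
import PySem

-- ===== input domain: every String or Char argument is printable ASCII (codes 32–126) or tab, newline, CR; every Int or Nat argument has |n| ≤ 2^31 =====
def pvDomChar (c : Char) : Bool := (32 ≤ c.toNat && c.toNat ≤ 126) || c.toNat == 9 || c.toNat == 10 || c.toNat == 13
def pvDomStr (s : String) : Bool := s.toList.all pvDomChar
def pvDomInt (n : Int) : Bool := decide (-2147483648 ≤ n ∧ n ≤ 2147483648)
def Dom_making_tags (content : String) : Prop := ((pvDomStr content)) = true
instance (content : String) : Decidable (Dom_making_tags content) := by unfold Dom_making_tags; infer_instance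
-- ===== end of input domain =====

-- B replaces A's split/enumerate/index-assignment/join pipeline with a single left-to-right
-- character scan that renders each space-delimited token as it ends (objective: alternative).

-- ===== PORT A =====
-- A's if-branch body: the four replace calls and the f-string, in A's order.
def pvLinkA (word : List Char) : List Char :=
  let tag := PySem.Chars.replace word "#".toList "".toList
  let tag := PySem.Chars.replace tag "!".toList "".toList
  let tag := PySem.Chars.replace tag ",".toList "".toList
  let tag := PySem.Chars.replace tag ".".toList "".toList
  "<a href='tag/".toList ++ tag ++ "'>".toList ++ word ++ "</a>".toList

def making_tags (content : String) : String :=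
  let words := PySem.Chars.splitOn content.toList " ".toList
  -- for i, word in enumerate(words): words[i] = link  (i from enumerate is ≥ 0, so .toNat is exact)
  let words := (PySem.List.enumerate words).foldl
    (fun ws p => if PySem.Chars.startswith p.2 "#".toList then ws.set p.1.toNat (pvLinkA p.2) else ws)
    words
  String.ofList (PySem.Chars.join " ".toList words)

-- ===== PORT B =====
-- Source B's _render: one filtering pass over the word builds the tag.
def pvRender (cs : List Char) : List Char :=
  if PySem.Chars.startswith cs "#".toList then
    "<a href='tag/".toList ++ cs.filter (fun c => !("#!,.".toList.contains c)) ++ "'>".toList ++ cs ++ "</a>".toList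
  else cs

-- Source B's for-loop over the characters: cur is the pending token (in reverse, list-cons accumulator).
def pvScan : List Char → List Char → List Char
  | [], cur => pvRender cur.reverse
  | c :: rest, cur =>
      if c == ' ' then pvRender cur.reverse ++ ' ' :: pvScan rest []
      else pvScan rest (c :: cur)

def making_tags_alt (content : String) : String :=
  String.ofList (pvScan content.toList [])

-- ===== PRECONDITION & SPEC =====
def Spec_making_tags (content : String) (out : String) : Prop := out = making_tags_alt content
instance (content : String) (out : String) : Decidable (Spec_making_tags content out) := by unfold Spec_making_tags; infer_instance

-- ===== CLAIM (what is proved, stated in full; the proofs are below) =====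
def Claim_equal_making_tags : Prop := ∀ (content : String), Dom_making_tags content → Spec_making_tags content (making_tags content)

-- ===== LEMMAS AND PROOFS =====

-- Simple split on a single space (proof-side model of both split(" ") and B's scan).
def pvSplit : List Char → List (List Char)
  | [] => [[]]
  | c :: rest =>
      if c = ' ' then [] :: pvSplit rest
      else match pvSplit rest with
        | [] => [[c]]
        | h :: t => (c :: h) :: t

def pvMapHead (f : List Char → List Char) : List (List Char) → List (List Char)
  | [] => []
  | h :: t => f h :: t

lemma pvSplit_ne_nil (cs : List Char) : pvSplit cs ≠ [] := by
  induction cs with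
  | nil => simp [pvSplit]
  | cons c rest ih =>
    simp only [pvSplit]
    split
    · simp
    · cases h : pvSplit rest <;> simp

lemma splitOn_go_space (fuel : ℕ) (l cur : List Char) (acc : List (List Char))
    (h : l.length < fuel) :
    PySem.Chars.splitOn.go [' '] fuel l cur acc
      = acc.reverse ++ pvMapHead (cur.reverse ++ ·) (pvSplit l) := by
  induction fuel generalizing l cur acc with
  | zero => omega
  | succ fuel ih =>
    cases l with
    | nil => simp [PySem.Chars.splitOn.go, pvSplit, pvMapHead]
    | cons c rest =>
      by_cases hc : c = ' '
      · subst hc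
        rw [show PySem.Chars.splitOn.go [' '] (fuel + 1) (' ' :: rest) cur acc
              = PySem.Chars.splitOn.go [' '] fuel rest [] (cur.reverse :: acc) by
            simp [PySem.Chars.splitOn.go, List.isPrefixOf]]
        rw [ih rest [] (cur.reverse :: acc) (by simpa using Nat.lt_of_succ_lt_succ h)]
        have hne := pvSplit_ne_nil rest
        cases hs : pvSplit rest with
        | nil => exact absurd hs hne
        | cons h0 t0 => simp [pvSplit, pvMapHead, hs]
      · have hc' : ¬ ' ' = c := fun h => hc h.symm
        rw [show PySem.Chars.splitOn.go [' '] (fuel + 1) (c :: rest) cur acc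
              = PySem.Chars.splitOn.go [' '] fuel rest (c :: cur) acc by
            simp [PySem.Chars.splitOn.go, List.isPrefixOf, hc']]
        rw [ih rest (c :: cur) acc (by simpa using Nat.lt_of_succ_lt_succ h)]
        have hne := pvSplit_ne_nil rest
        cases hs : pvSplit rest with
        | nil => exact absurd hs hne
        | cons h0 t0 => simp [pvSplit, pvMapHead, hs, hc]

lemma splitOn_space (cs : List Char) :
    PySem.Chars.splitOn cs [' '] = pvSplit cs := by
  unfold PySem.Chars.splitOn
  rw [splitOn_go_space (cs.length + 1) cs [] [] (by omega)]
  cases pvSplit cs <;> simp [pvMapHead]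

-- replace with a one-char pattern and empty replacement is a filter
lemma replace_go_filter (c : Char) (fuel : ℕ) (l acc : List Char) (h : l.length ≤ fuel) :
    PySem.Chars.replace.go [c] [] fuel l acc = acc.reverse ++ l.filter (fun x => !(x == c)) := by
  induction fuel generalizing l acc with
  | zero =>
    cases l with
    | nil => simp [PySem.Chars.replace.go]
    | cons x t => simp at h
  | succ fuel ih =>
    cases l with
    | nil => simp [PySem.Chars.replace.go]
    | cons x t =>
      by_cases hx : x = c
      · subst hx
        rw [show PySem.Chars.replace.go [x] [] (fuel + 1) (x :: t) acc
              = PySem.Chars.replace.go [x] [] fuel t acc by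
            simp [PySem.Chars.replace.go, List.isPrefixOf]]
        rw [ih t acc (by simpa using Nat.le_of_succ_le_succ h)]
        simp
      · have hx' : ¬ c = x := fun h => hx h.symm
        rw [show PySem.Chars.replace.go [c] [] (fuel + 1) (x :: t) acc
              = PySem.Chars.replace.go [c] [] fuel t (x :: acc) by
            simp [PySem.Chars.replace.go, List.isPrefixOf, hx']]
        rw [ih t (x :: acc) (by simpa using Nat.le_of_succ_le_succ h)]
        simp [hx]

lemma replace_filter (cs : List Char) (c : Char) :
    PySem.Chars.replace cs [c] [] = cs.filter (fun x => !(x == c)) := by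
  unfold PySem.Chars.replace
  simpa using replace_go_filter c cs.length cs [] (le_refl _)

lemma wordA_eq_render (w : List Char) :
    (if PySem.Chars.startswith w "#".toList then pvLinkA w else w) = pvRender w := by
  unfold pvLinkA pvRender
  simp only [show "#".toList = ['#'] from rfl, show "!".toList = ['!'] from rfl,
    show ",".toList = [','] from rfl, show ".".toList = ['.'] from rfl,
    show "".toList = ([] : List Char) from rfl, show "#!,.".toList = ['#', '!', ',', '.'] from rfl]
  have hp : (fun a : Char => !(a == '.') && !(a == ',') && !(a == '!') && !(a == '#'))
      = (fun c : Char => !(['#', '!', ',', '.'].contains c)) := by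
    funext x
    by_cases h1 : x = '#' <;> by_cases h2 : x = '!' <;> by_cases h3 : x = ',' <;>
      by_cases h4 : x = '.' <;> simp_all
  split
  · rw [replace_filter, replace_filter, replace_filter, replace_filter,
        List.filter_filter, List.filter_filter, List.filter_filter, hp]
  · rfl

-- A's enumerate/set loop is a map
lemma foldl_enum_set (g : List Char → List Char) :
    ∀ (l pre : List (List Char)) (k : ℤ), k = pre.length →
    (PySem.List.enumerate l k).foldl
        (fun ws p => if PySem.Chars.startswith p.2 "#".toList then ws.set p.1.toNat (g p.2) else ws)
        (pre ++ l)
      = pre ++ l.map (fun w => if PySem.Chars.startswith w "#".toList then g w else w) := by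
  intro l
  induction l with
  | nil => intro pre k hk; simp [PySem.List.enumerate]
  | cons w r ih =>
    intro pre k hk
    rw [show PySem.List.enumerate (w :: r) k = (k, w) :: PySem.List.enumerate r (k + 1) by
      simp [PySem.List.enumerate]]
    rw [List.foldl_cons]
    by_cases hw : PySem.Chars.startswith w "#".toList
    · have hstep : (if PySem.Chars.startswith w "#".toList then
            (pre ++ w :: r).set k.toNat (g w) else pre ++ w :: r) = pre ++ g w :: r := by
        rw [if_pos hw, hk]; simp
      rw [hstep, show pre ++ g w :: r = (pre ++ [g w]) ++ r by simp,
          ih (pre ++ [g w]) (k + 1) (by simp [hk])]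
      simp only [List.map_cons, if_pos hw]
      simp
    · have hstep : (if PySem.Chars.startswith w "#".toList then
            (pre ++ w :: r).set k.toNat (g w) else pre ++ w :: r) = pre ++ w :: r := by
        rw [if_neg hw]
      rw [hstep, show pre ++ w :: r = (pre ++ [w]) ++ r by simp,
          ih (pre ++ [w]) (k + 1) (by simp [hk])]
      simp only [List.map_cons, if_neg hw]
      simp

lemma pvMapHead_id (ps : List (List Char)) : pvMapHead (fun x => x) ps = ps := by
  cases ps <;> simp [pvMapHead]

-- B's scan produces the join of the rendered split
lemma scan_spec : ∀ (l cur : List Char),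
    pvScan l cur
      = PySem.Chars.join [' '] ((pvMapHead (cur.reverse ++ ·) (pvSplit l)).map pvRender) := by
  intro l
  induction l with
  | nil => intro cur; simp [pvScan, pvSplit, pvMapHead, PySem.Chars.join_singleton]
  | cons c rest ih =>
    intro cur
    by_cases hc : c = ' '
    · subst hc
      rw [show pvScan (' ' :: rest) cur = pvRender cur.reverse ++ ' ' :: pvScan rest [] by
        simp [pvScan]]
      rw [ih []]
      have hne := pvSplit_ne_nil rest
      cases hs : pvSplit rest with
      | nil => exact absurd hs hne
      | cons h0 t0 =>
        have hsp : pvSplit (' ' :: rest) = [] :: h0 :: t0 := by simp [pvSplit, hs]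
        rw [hsp]
        simp only [pvMapHead, List.map_cons, PySem.Chars.join_cons_cons]
        simp
    · rw [show pvScan (c :: rest) cur = pvScan rest (c :: cur) by simp [pvScan, hc]]
      rw [ih (c :: cur)]
      have hne := pvSplit_ne_nil rest
      cases hs : pvSplit rest with
      | nil => exact absurd hs hne
      | cons h0 t0 => simp [pvSplit, pvMapHead, hs, hc]

-- ===== VERDICT (by name: the statement is the Claim_ definition above) =====
theorem making_tags_spec : Claim_equal_making_tags := by
  intro content _
  show making_tags content = making_tags_alt content
  unfold making_tags making_tags_alt
  apply congrArg String.ofList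
  rw [show (" ".toList : List Char) = [' '] from rfl, splitOn_space]
  have hA := foldl_enum_set pvLinkA (pvSplit content.toList) [] 0 (by simp)
  simp only [List.nil_append] at hA
  rw [hA]
  rw [scan_spec content.toList [], List.reverse_nil]
  simp only [List.nil_append, pvMapHead_id]
  simp only [wordA_eq_render]
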